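-- pv_equiv track=rewrite | github.com/gajanlee/SLN-Summarization | code_v2/sln_constructor.py | merge_neighbor_identical_tag
-- ===== SOURCE A (Python) =====
-- def merge_neighbor_identical_tag(word_pos_tags):
--     # word_pos_tags: [(word1, pos1), (word2, pos1), (word3, pos2), ...]
--     # Return [("word1 word2", pos1), (word3, pos2), ...]
--     new_word_pos_tags = []
--
--     candidate_phrase = ""
--     for i, (word, pos) in enumerate(word_pos_tags):
--         if i < len(word_pos_tags) - 1 and pos == word_pos_tags[i+1][1]:
--             candidate_phrase += f"{word} "
--         else:
--             candidate_phrase += f"{word} "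
--             new_word_pos_tags.append((candidate_phrase.strip(), pos))
--             candidate_phrase = ""
--
--     return new_word_pos_tags
-- ===== SOURCE B (Python) =====
-- def merge_neighbor_identical_tag(word_pos_tags):
--     out = []
--     i, n = 0, len(word_pos_tags)
--     while i < n:
--         pos = word_pos_tags[i][1]
--         j = i + 1
--         while j < n and word_pos_tags[j][1] == pos:
--             j += 1
--         out.append((" ".join(str(w) for w, _ in word_pos_tags[i:j]).strip(), pos))
--         i = j
--     return out
-- ===== Notes on version B (the rewrite author's own statement) =====
-- stated objective: alternative
-- what changed: A's element-wise loop with a next-element lookahead and a running candidate string is replaced by run-peeling: an outer loop per maximal run whose inner scan finds the run's end index, then the run is sliced out, its words joined with spaces and stripped; no string accumulator is carried across iterations.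
import Mathlib
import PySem

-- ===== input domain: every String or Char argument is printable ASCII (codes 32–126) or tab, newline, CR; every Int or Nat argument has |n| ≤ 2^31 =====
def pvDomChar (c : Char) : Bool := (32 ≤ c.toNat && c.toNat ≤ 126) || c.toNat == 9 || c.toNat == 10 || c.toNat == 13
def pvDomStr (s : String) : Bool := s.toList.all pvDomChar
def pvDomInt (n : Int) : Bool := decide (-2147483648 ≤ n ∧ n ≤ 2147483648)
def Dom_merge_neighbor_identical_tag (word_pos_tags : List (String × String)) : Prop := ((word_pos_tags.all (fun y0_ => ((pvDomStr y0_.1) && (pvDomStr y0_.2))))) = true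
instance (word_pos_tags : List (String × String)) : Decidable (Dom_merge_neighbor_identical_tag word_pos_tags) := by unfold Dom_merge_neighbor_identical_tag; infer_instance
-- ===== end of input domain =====

-- B replaces A's element-wise loop (lookahead at the next tag, running candidate string)
-- by run-peeling: an outer loop per maximal run, an inner scan locating the run's end
-- index, then slice + join + strip per run (objective: alternative).

-- ===== PORT A =====
-- the loop body: state = (new_word_pos_tags, candidate_phrase), element = (i, (word, pos))
def mergeStepA (wpt : List (String × String)) (st : List (String × String) × String)
    (iwp : Int × (String × String)) : List (String × String) × String :=
  if iwp.1 < (wpt.length : Int) - 1 ∧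
      (PySem.List.pyGet? wpt (iwp.1 + 1)).map Prod.snd = some iwp.2.2 then
    (st.1, st.2 ++ iwp.2.1 ++ " ")
  else
    (st.1 ++ [(PySem.Str.strip (st.2 ++ iwp.2.1 ++ " "), iwp.2.2)], "")

def merge_neighbor_identical_tag (word_pos_tags : List (String × String)) : List (String × String) :=
  ((PySem.List.enumerate word_pos_tags).foldl (mergeStepA word_pos_tags) ([], "")).1

-- ===== PORT B =====
-- inner while loop: 'while j < n and word_pos_tags[j][1] == pos: j += 1'
def runEnd (wpt : List (String × String)) (pos : String) (j : Nat) : Nat :=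
  if h : j < wpt.length then
    if wpt[j].2 = pos then runEnd wpt pos (j + 1) else j
  else j
termination_by wpt.length - j

-- termination helper for the outer loop: j never moves backwards
lemma runEnd_ge (wpt : List (String × String)) (pos : String) (j : Nat) :
    j ≤ runEnd wpt pos j := by
  induction hj : wpt.length - j using Nat.strong_induction_on generalizing j with
  | _ d ih =>
    unfold runEnd
    split
    · next h =>
      split
      · exact le_trans (by omega) (ih (wpt.length - (j + 1)) (by omega) (j + 1) rfl)
      · exact le_refl j
    · exact le_refl j

-- outer while loop: peel the run [i:j], emit it, continue at i = j
def mergeGo (wpt : List (String × String)) (i : Nat) : List (String × String) :=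
  if h : i < wpt.length then
    let pos := wpt[i].2
    let j := runEnd wpt pos (i + 1)
    (PySem.Str.strip (PySem.Str.join " "
        ((PySem.List.slice wpt (some (i : Int)) (some (j : Int))).map Prod.fst)), pos)
      :: mergeGo wpt j
  else []
termination_by wpt.length - i
decreasing_by
  have := runEnd_ge wpt wpt[i].2 (i + 1)
  omega

def merge_neighbor_identical_tag_alt (word_pos_tags : List (String × String)) : List (String × String) :=
  mergeGo word_pos_tags 0

-- ===== PRECONDITION & SPEC =====
def Spec_merge_neighbor_identical_tag (word_pos_tags : List (String × String)) (out : List (String × String)) : Prop := out = merge_neighbor_identical_tag_alt word_pos_tags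
instance (word_pos_tags : List (String × String)) (out : List (String × String)) : Decidable (Spec_merge_neighbor_identical_tag word_pos_tags out) := by unfold Spec_merge_neighbor_identical_tag; infer_instance

-- ===== CLAIM =====
def Claim_equal_merge_neighbor_identical_tag : Prop :=
  ∀ (word_pos_tags : List (String × String)), Dom_merge_neighbor_identical_tag word_pos_tags →
    Spec_merge_neighbor_identical_tag word_pos_tags (merge_neighbor_identical_tag word_pos_tags)

-- ===== LEMMAS AND PROOFS =====

-- A's loop rephrased structurally: fA cand w p rest merges (w,p)::rest with pending text cand.
def fA : String → String → String → List (String × String) → List (String × String)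
  | cand, w, p, [] => [(PySem.Str.strip (cand ++ w ++ " "), p)]
  | cand, w, p, (w2, p2) :: rest =>
    if p2 = p then fA (cand ++ w ++ " ") w2 p2 rest
    else (PySem.Str.strip (cand ++ w ++ " "), p) :: fA "" w2 p2 rest

def gA : String → List (String × String) → List (String × String)
  | _, [] => []
  | cand, (w, p) :: rest => fA cand w p rest

-- each word followed by one space, concatenated (A's candidate_phrase for one run)
def spaced : List String → String
  | [] => ""
  | w :: ws => w ++ " " ++ spaced ws

-- B's run-peeling rephrased structurally over the list front
def altSpec : List (String × String) → List (String × String)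
  | [] => []
  | (w, p) :: rest =>
    (PySem.Str.strip (PySem.Str.join " "
        (w :: (rest.takeWhile (fun e => e.2 == p)).map Prod.fst)), p)
      :: altSpec (rest.dropWhile (fun e => e.2 == p))
termination_by l => l.length
decreasing_by
  have := List.length_dropWhile_le (p := fun e => e.2 == p) (l := rest)
  simp; omega

lemma isspace_space : PySem.Chars.isspace ' ' = true := by decide

lemma rstrip_snoc_space (l : List Char) :
    PySem.Chars.rstrip (l ++ [' ']) = PySem.Chars.rstrip l := by
  simp [PySem.Chars.rstrip, isspace_space]

lemma chars_strip_snoc_space (l : List Char) :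
    PySem.Chars.strip (l ++ [' ']) = PySem.Chars.strip l := by
  show PySem.Chars.rstrip (PySem.Chars.lstrip (l ++ [' '])) =
    PySem.Chars.rstrip (PySem.Chars.lstrip l)
  unfold PySem.Chars.lstrip
  rw [List.dropWhile_append]
  cases h : (List.dropWhile PySem.Chars.isspace l).isEmpty with
  | true =>
    rw [List.isEmpty_iff] at h
    simp [h, isspace_space]
  | false => simp [rstrip_snoc_space]

lemma spaced_toList (ws : List String) (hne : ws ≠ []) :
    (spaced ws).toList = (PySem.Str.join " " ws).toList ++ [' '] := by
  induction ws with
  | nil => exact absurd rfl hne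
  | cons w ws ih =>
    cases ws with
    | nil =>
      simp [spaced, String.toList_append, PySem.Str.toList_join, PySem.Chars.join_singleton]
    | cons w2 ws2 =>
      rw [show spaced (w :: w2 :: ws2) = w ++ " " ++ spaced (w2 :: ws2) from rfl,
        String.toList_append, String.toList_append, ih (by simp)]
      simp [PySem.Str.toList_join, List.map_cons, PySem.Chars.join_cons_cons]

lemma strip_spaced_join (ws : List String) :
    PySem.Str.strip (spaced ws) = PySem.Str.strip (PySem.Str.join " " ws) := by
  cases ws with
  | nil =>
    show PySem.Str.strip "" = _
    simp [PySem.Str.strip, PySem.Str.toList_join, PySem.Chars.join_nil]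
  | cons w ws =>
    show String.ofList _ = String.ofList _
    rw [PySem.Chars.strip, PySem.Chars.strip,
      spaced_toList (w :: ws) (by simp)]
    rw [show PySem.Chars.rstrip (PySem.Chars.lstrip ((PySem.Str.join " " (w :: ws)).toList ++ [' ']))
        = PySem.Chars.strip ((PySem.Str.join " " (w :: ws)).toList ++ [' ']) from rfl,
      chars_strip_snoc_space]
    rfl

-- A's fold equals the structural recursion gA
lemma foldA (wpt : List (String × String)) :
    ∀ (xs : List (String × String)) (k : Nat), wpt.drop k = xs →
      ∀ st : List (String × String) × String,
        (PySem.List.enumerate xs (k : Int)).foldl (mergeStepA wpt) st =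
          (st.1 ++ gA st.2 xs, if xs.isEmpty then st.2 else "") := by
  intro xs
  induction xs with
  | nil => intro k _ st; simp [PySem.List.enumerate_nil, gA]
  | cons hd rest ih =>
    intro k hdrop st
    obtain ⟨w, p⟩ := hd
    have hk : k < wpt.length := by
      by_contra hle
      rw [List.drop_eq_nil_iff.mpr (by omega)] at hdrop
      exact absurd hdrop (by simp)
    have hdrop1 : wpt.drop (k + 1) = rest := by
      rw [← List.tail_drop, hdrop]; rfl
    have hlen : wpt.length - k = rest.length + 1 := by
      have := congrArg List.length hdrop
      simpa [List.length_drop] using this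
    rw [PySem.List.enumerate_cons, List.foldl_cons]
    have hcast : (k : Int) + 1 = ((k + 1 : Nat) : Int) := by push_cast; ring
    cases rest with
    | nil =>
      have hcond : ¬ ((k : Int) < (wpt.length : Int) - 1 ∧
          (PySem.List.pyGet? wpt ((k : Int) + 1)).map Prod.snd = some p) := by
        rintro ⟨h1, -⟩
        have : wpt.length = k + 1 := by simp at hlen; omega
        rw [this] at h1
        omega
      rw [show mergeStepA wpt st ((k : Int), (w, p))
          = (st.1 ++ [(PySem.Str.strip (st.2 ++ w ++ " "), p)], "") from by
        unfold mergeStepA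
        rw [if_neg hcond]]
      simp [PySem.List.enumerate_nil, gA, fA]
    | cons hd2 rest2 =>
      obtain ⟨w2, p2⟩ := hd2
      have hget : PySem.List.pyGet? wpt ((k : Int) + 1) = some (w2, p2) := by
        rw [hcast, PySem.List.pyGet?_natCast]
        have : wpt[k + 1]? = (wpt.drop (k + 1))[0]? := by
          rw [List.getElem?_drop]
        rw [this, hdrop1]
        rfl
      have hlt : (k : Int) < (wpt.length : Int) - 1 := by
        have : k + 2 ≤ wpt.length := by simp at hlen; omega
        omega
      by_cases hpp : p2 = p
      · rw [show mergeStepA wpt st ((k : Int), (w, p)) = (st.1, st.2 ++ w ++ " ") from by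
          simp [mergeStepA, hget, hlt, hpp]]
        rw [hcast, ih (k + 1) hdrop1]
        simp [gA, fA, hpp]
      · rw [show mergeStepA wpt st ((k : Int), (w, p))
            = (st.1 ++ [(PySem.Str.strip (st.2 ++ w ++ " "), p)], "") from by
          simp [mergeStepA, hget, hlt, hpp]]
        rw [hcast, ih (k + 1) hdrop1]
        simp [gA, fA, hpp]

-- the inner scan computes the takeWhile boundary of the suffix
lemma runEnd_drop (wpt : List (String × String)) (pos : String) :
    ∀ j, runEnd wpt pos j = j + ((wpt.drop j).takeWhile (fun e => e.2 == pos)).length := by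
  intro j
  induction hj : wpt.length - j using Nat.strong_induction_on generalizing j with
  | _ d ih =>
    by_cases h : j < wpt.length
    · have hd : wpt.drop j = wpt[j] :: wpt.drop (j + 1) := (List.getElem_cons_drop h).symm
      by_cases hp : wpt[j].2 = pos
      · rw [show runEnd wpt pos j = runEnd wpt pos (j + 1) from by
          conv_lhs => rw [runEnd]
          simp [h, hp]]
        rw [ih (wpt.length - (j + 1)) (by omega) (j + 1) rfl, hd]
        rw [List.takeWhile_cons_of_pos (by simpa using hp)]
        simp; omega
      · rw [show runEnd wpt pos j = j from by
          conv_lhs => rw [runEnd]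
          simp [h, hp]]
        rw [hd, List.takeWhile_cons_of_neg (by simpa using hp)]
        simp
    · rw [show runEnd wpt pos j = j from by
        conv_lhs => rw [runEnd]
        simp [h]]
      rw [List.drop_eq_nil_iff.mpr (by omega)]
      simp

lemma take_len_takeWhile {α : Type} (p : α → Bool) (l : List α) :
    l.take (l.takeWhile p).length = l.takeWhile p := by
  induction l with
  | nil => simp
  | cons a t ih =>
    by_cases h : p a
    · simp [List.takeWhile_cons_of_pos h, ih]
    · simp [List.takeWhile_cons_of_neg h]

lemma drop_len_takeWhile {α : Type} (p : α → Bool) (l : List α) :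
    l.drop (l.takeWhile p).length = l.dropWhile p := by
  induction l with
  | nil => simp
  | cons a t ih =>
    by_cases h : p a
    · simp [List.takeWhile_cons_of_pos h, List.dropWhile_cons_of_pos h, ih]
    · simp [List.takeWhile_cons_of_neg h, List.dropWhile_cons_of_neg h]

-- B's index loop equals the structural recursion altSpec on the suffix
lemma mergeGo_eq (wpt : List (String × String)) :
    ∀ i, mergeGo wpt i = altSpec (wpt.drop i) := by
  intro i
  induction hj : wpt.length - i using Nat.strong_induction_on generalizing i with
  | _ d ih =>
    by_cases h : i < wpt.length
    · have hd : wpt.drop i = wpt[i] :: wpt.drop (i + 1) := (List.getElem_cons_drop h).symm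
      obtain ⟨w, p, hwp⟩ : ∃ w p, wpt[i] = (w, p) := ⟨wpt[i].1, wpt[i].2, rfl⟩
      set T := (wpt.drop (i + 1)).takeWhile (fun e => e.2 == p) with hT
      have hre : runEnd wpt p (i + 1) = (i + 1) + T.length := by
        rw [runEnd_drop]
      have hjle : (i + 1) + T.length ≤ wpt.length := by
        have h1 : T.length ≤ (wpt.drop (i + 1)).length := (List.takeWhile_prefix _).length_le
        have h2 : (wpt.drop (i + 1)).length = wpt.length - (i + 1) := by simp
        omega
      have hslice : PySem.List.slice wpt (some (i : Int)) (some (((i + 1) + T.length : Nat) : Int))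
          = (w, p) :: T := by
        rw [PySem.List.slice_natCast]
        have : (i + 1) + T.length - i = T.length + 1 := by omega
        rw [this, hd, hwp, List.take_succ_cons]
        congr 1
        exact take_len_takeWhile _ _
      have hdropT : wpt.drop ((i + 1) + T.length) = (wpt.drop (i + 1)).dropWhile (fun e => e.2 == p) := by
        rw [← drop_len_takeWhile (fun e => e.2 == p) (wpt.drop (i + 1)), ← hT,
          List.drop_drop]
      rw [show mergeGo wpt i = (PySem.Str.strip (PySem.Str.join " "
            ((PySem.List.slice wpt (some (i : Int)) (some ((runEnd wpt wpt[i].2 (i + 1) : Nat) : Int))).map Prod.fst)), wpt[i].2)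
          :: mergeGo wpt (runEnd wpt wpt[i].2 (i + 1)) from by
        rw [mergeGo, dif_pos h]]
      rw [hwp, hre, hslice,
        ih (wpt.length - ((i + 1) + T.length)) (by omega) _ rfl, hdropT, hd, hwp]
      rw [altSpec]
      simp [hT]
    · rw [show mergeGo wpt i = [] from by rw [mergeGo, dif_neg h]]
      rw [List.drop_eq_nil_iff.mpr (by omega)]
      simp [altSpec]

-- A's structural recursion equals B's structural recursion
lemma fA_spec : ∀ (rest : List (String × String)) (cand w p),
    fA cand w p rest =
      (PySem.Str.strip (cand ++ spaced (w :: (rest.takeWhile (fun e => e.2 == p)).map Prod.fst)), p)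
        :: altSpec (rest.dropWhile (fun e => e.2 == p)) := by
  intro rest
  induction rest with
  | nil =>
    intro cand w p
    simp [fA, altSpec, spaced, String.append_assoc, String.append_empty]
  | cons hd tl ih =>
    intro cand w p
    obtain ⟨w2, p2⟩ := hd
    by_cases hpp : p2 = p
    · subst hpp
      rw [show fA cand w p2 ((w2, p2) :: tl) = fA (cand ++ w ++ " ") w2 p2 tl from by
        simp [fA]]
      rw [ih, List.takeWhile_cons_of_pos (by simp), List.dropWhile_cons_of_pos (by simp)]
      simp [spaced, String.append_assoc]
    · rw [show fA cand w p ((w2, p2) :: tl)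
          = (PySem.Str.strip (cand ++ w ++ " "), p) :: fA "" w2 p2 tl from by
        simp [fA, hpp]]
      rw [ih, List.takeWhile_cons_of_neg (by simp [hpp]), List.dropWhile_cons_of_neg (by simp [hpp])]
      rw [altSpec]
      have hsj := strip_spaced_join (w2 :: (tl.takeWhile (fun e => e.2 == p2)).map Prod.fst)
      simp only [spaced, String.append_assoc] at hsj
      simp [spaced, String.append_assoc, String.append_empty, String.empty_append, hsj]

-- ===== VERDICT =====
theorem merge_neighbor_identical_tag_spec : Claim_equal_merge_neighbor_identical_tag := by
  intro wpt _
  show merge_neighbor_identical_tag wpt = merge_neighbor_identical_tag_alt wpt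
  have h0 : merge_neighbor_identical_tag wpt = gA "" wpt := by
    unfold merge_neighbor_identical_tag
    rw [show (0 : Int) = ((0 : Nat) : Int) from rfl, foldA wpt wpt 0 rfl]
    simp
  rw [h0]
  unfold merge_neighbor_identical_tag_alt
  rw [show mergeGo wpt 0 = altSpec wpt from by rw [mergeGo_eq]; simp]
  cases wpt with
  | nil => simp [gA, altSpec]
  | cons hd rest =>
    obtain ⟨w, p⟩ := hd
    rw [show gA "" ((w, p) :: rest) = fA "" w p rest from rfl, fA_spec, altSpec]
    simp [String.empty_append, strip_spaced_join]
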